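-- pv_equiv track=rewrite | github.com/LilaShiba/2019_Lessons | daily_problem/97_yahtzee.py | high_y
-- ===== SOURCE A (Python) =====
-- def high_y(roll):
--     table = {}
--     for die in roll:
--         if die not in table:
--             table[die] = die
--         else:
--             table[die] += die
--     return max(table.values())
-- ===== SOURCE B (Python) =====
-- def high_y(roll):
--     sums = []
--     prev = None
--     for die in sorted(roll):
--         if sums and die == prev:
--             sums[-1] += die
--         else:
--             sums.append(die)
--             prev = die
--     return max(sums)
-- ===== Notes on version B (the rewrite author's own statement) =====
-- stated objective: alternative
-- what changed: Replaces the per-element dict accumulation with a sort followed by one adjacency scan that sums each maximal run of equal values and takes the max of the run sums; no dict is built.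
import Mathlib
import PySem

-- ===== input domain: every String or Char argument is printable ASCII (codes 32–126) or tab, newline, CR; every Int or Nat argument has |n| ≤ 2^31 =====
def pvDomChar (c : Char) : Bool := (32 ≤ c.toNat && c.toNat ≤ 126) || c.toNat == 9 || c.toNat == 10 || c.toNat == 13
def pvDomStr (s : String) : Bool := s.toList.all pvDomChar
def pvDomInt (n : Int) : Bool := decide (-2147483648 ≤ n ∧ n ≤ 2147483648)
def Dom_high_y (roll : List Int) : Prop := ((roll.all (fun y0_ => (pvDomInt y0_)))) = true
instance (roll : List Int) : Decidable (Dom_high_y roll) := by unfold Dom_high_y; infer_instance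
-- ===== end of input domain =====

-- B sorts the roll and scans adjacent runs instead of building a dict; same result, different traversal.

-- ===== PORT A =====
-- A: build table[die] (first occurrence inserts die, later ones add die), then max(table.values()).
def stepA (t : PySem.Dict Int Int) (die : Int) : PySem.Dict Int Int :=
  if t.contains die = false then t.insert die die else t.modify die 0 (· + die)

def high_y (roll : List Int) : Int :=
  let table := roll.foldl stepA PySem.Dict.empty
  -- max(...) raises ValueError on an empty dict; Pre_high_y excludes roll = []
  (PySem.List.max? table.values (fun y => y)).getD 0

-- ===== PORT B =====
-- B: sums = run sums of sorted(roll) built by adjacency (sums[-1] += die continues a run), then max(sums).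
def stepB (st : List Int × Option Int) (die : Int) : List Int × Option Int :=
  if st.1 ≠ [] ∧ st.2 = some die then
    (st.1.dropLast ++ [st.1.getLastD 0 + die], st.2)   -- sums[-1] += die
  else
    (st.1 ++ [die], some die)

def high_y_alt (roll : List Int) : Int :=
  let st := (PySem.List.sorted roll (fun x => x) false).foldl stepB ([], none)
  (PySem.List.max? st.1 (fun y => y)).getD 0

-- ===== PRECONDITION & SPEC =====
-- Pre_ excludes only the empty roll, on which A raises ValueError (max of an empty sequence); B raises too.
def Pre_high_y (roll : List Int) : Prop := roll ≠ []
instance (roll : List Int) : Decidable (Pre_high_y roll) := by unfold Pre_high_y; infer_instance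
def pvWitness_high_y : List Int := ([1, 2, 2])

def Spec_high_y (roll : List Int) (out : Int) : Prop := out = high_y_alt roll
instance (roll : List Int) (out : Int) : Decidable (Spec_high_y roll out) := by unfold Spec_high_y; infer_instance

-- ===== CLAIM (what is proved, stated in full; the proofs are below) =====
def Claim_equal_high_y : Prop := ∀ (roll : List Int), Dom_high_y roll → Pre_high_y roll → Spec_high_y roll (high_y roll)

-- ===== LEMMAS AND PROOFS =====

-- both results are "a group sum v * count v attained in roll, and an upper bound of all group sums"
def Good (xs : List Int) (r : Int) : Prop :=
  (∃ v ∈ xs, r = v * xs.count v) ∧ ∀ v ∈ xs, v * xs.count v ≤ r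

lemma good_unique {xs : List Int} {r₁ r₂ : Int} (h₁ : Good xs r₁) (h₂ : Good xs r₂) : r₁ = r₂ := by
  obtain ⟨⟨v₁, hv₁, he₁⟩, hb₁⟩ := h₁
  obtain ⟨⟨v₂, hv₂, he₂⟩, hb₂⟩ := h₂
  have := hb₂ v₁ hv₁
  have := hb₁ v₂ hv₂
  omega

-- ----- A side -----
lemma getD_foldA : ∀ (l : List Int) (d : PySem.Dict Int Int) (v : Int),
    (l.foldl stepA d).getD v 0 = d.getD v 0 + v * l.count v := by
  intro l
  induction l with
  | nil => intro d v; simp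
  | cons a l ih =>
    intro d v
    simp only [List.foldl_cons, ih, stepA]
    cases hc : d.contains a with
    | false =>
      rw [if_pos (Eq.refl false), PySem.Dict.getD_insert]
      by_cases hv : v = a
      · subst hv
        rw [PySem.Dict.getD_of_not_contains d 0 hc]
        simp; ring
      · simp [hv, Ne.symm hv]
    | true =>
      simp only [Bool.true_eq_false, if_false]
      rw [PySem.Dict.getD_modify]
      by_cases hv : v = a
      · subst hv; simp; ring
      · simp [hv, Ne.symm hv]

lemma mem_keys_foldA : ∀ (l : List Int) (d : PySem.Dict Int Int) (v : Int),
    v ∈ (l.foldl stepA d).keys ↔ v ∈ d.keys ∨ v ∈ l := by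
  intro l
  induction l with
  | nil => simp
  | cons a l ih =>
    intro d v
    simp only [List.foldl_cons, ih, stepA]
    cases hc : d.contains a with
    | false =>
      rw [if_pos (Eq.refl false)]
      simp only [PySem.Dict.mem_keys_insert, List.mem_cons]
      tauto
    | true =>
      simp only [Bool.true_eq_false, if_false]
      have ha : a ∈ d.keys := (PySem.Dict.contains_iff_mem_keys d a).mp hc
      rw [PySem.Dict.keys_modify]
      simp only [PySem.Dict.mem_keys_insert, List.mem_cons]
      constructor
      · rintro ((h | h) | h)
        · subst h; tauto
        · tauto
        · tauto
      · rintro (h | h | h)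
        · tauto
        · subst h; tauto
        · tauto

lemma nodup_keys_foldA : ∀ (l : List Int) (d : PySem.Dict Int Int),
    d.keys.Nodup → (l.foldl stepA d).keys.Nodup := by
  intro l
  induction l with
  | nil => intro d h; simpa
  | cons a l ih =>
    intro d h
    simp only [List.foldl_cons, stepA]
    cases hc : d.contains a with
    | false =>
      rw [if_pos (Eq.refl false)]
      apply ih
      rw [PySem.Dict.keys_insert_of_not_contains d a hc]
      rw [List.nodup_append]
      refine ⟨h, by simp, ?_⟩
      intro x hx y hy
      simp only [List.mem_singleton] at hy
      subst hy
      intro hxy; subst hxy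
      exact absurd ((PySem.Dict.contains_iff_mem_keys d x).mpr hx) (by simp [hc])
    | true =>
      simp only [Bool.true_eq_false, if_false]
      apply ih
      rw [PySem.Dict.keys_modify, PySem.Dict.keys_insert_of_contains d _ hc]
      exact h

lemma goodA (xs : List Int) (hne : xs ≠ []) : Good xs (high_y xs) := by
  have hnodup : (xs.foldl stepA PySem.Dict.empty).keys.Nodup :=
    nodup_keys_foldA xs PySem.Dict.empty (by exact PySem.Dict.nodup_keys_empty)
  have hmem : ∀ v, v ∈ (xs.foldl stepA PySem.Dict.empty).keys ↔ v ∈ xs := by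
    intro v; rw [mem_keys_foldA]; simp [PySem.Dict.keys_empty]
  have hget : ∀ v, (xs.foldl stepA PySem.Dict.empty).getD v 0 = v * xs.count v := by
    intro v; rw [getD_foldA]; simp
  have hvals : (xs.foldl stepA PySem.Dict.empty).values
      = (xs.foldl stepA PySem.Dict.empty).keys.map (fun k => k * xs.count k) := by
    rw [PySem.Dict.values_eq_map_keys _ hnodup 0]
    exact List.map_congr_left (fun k _ => hget k)
  have hvne : (xs.foldl stepA PySem.Dict.empty).values ≠ [] := by
    rw [hvals]
    obtain ⟨x, hx⟩ := List.exists_mem_of_ne_nil xs hne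
    intro h
    have : x ∈ (xs.foldl stepA PySem.Dict.empty).keys := (hmem x).mpr hx
    simp_all
  obtain ⟨m, hm⟩ : ∃ m, PySem.List.max? (xs.foldl stepA PySem.Dict.empty).values (fun y => y) = some m := by
    cases h : PySem.List.max? (xs.foldl stepA PySem.Dict.empty).values (fun y => y) with
    | none => exact absurd ((PySem.List.max?_eq_none_iff _ _).mp h) hvne
    | some m => exact ⟨m, rfl⟩
  have hres : high_y xs = m := by simp [high_y, hm]
  rw [hres]
  constructor
  · have hmmem := PySem.List.max?_mem hm
    rw [hvals] at hmmem
    obtain ⟨k, hk, hkm⟩ := List.mem_map.mp hmmem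
    exact ⟨k, (hmem k).mp hk, hkm.symm⟩
  · intro v hv
    have : v * xs.count v ∈ (xs.foldl stepA PySem.Dict.empty).values := by
      rw [hvals]; exact List.mem_map.mpr ⟨v, (hmem v).mpr hv, rfl⟩
    exact PySem.List.max?_isMax hm _ this

-- ----- B side -----
def InvB (p : List Int) (st : List Int × Option Int) : Prop :=
  (p = [] ∧ st = ([], none)) ∨
  ∃ ds prev, st.2 = some prev ∧
    st.1 = (ds ++ [prev]).map (fun v => v * p.count v) ∧
    (ds ++ [prev]).Nodup ∧
    (∀ v, v ∈ ds ++ [prev] ↔ v ∈ p) ∧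
    (∀ v ∈ p, v ≤ prev)

lemma stepB_inv {p : List Int} {st : List Int × Option Int} (h : InvB p st) (d : Int)
    (hd : ∀ v ∈ p, v ≤ d) : InvB (p ++ [d]) (stepB st d) := by
  rcases h with ⟨hp, hst⟩ | ⟨ds, prev, h2, h1, hnd, hiff, hbd⟩
  · subst hp hst
    right
    refine ⟨[], d, ?_⟩
    simp [stepB]
  · have hne1 : st.1 ≠ [] := by rw [h1]; simp
    by_cases hdp : d = prev
    · have hcond : (st.1 ≠ [] ∧ st.2 = some d) := ⟨hne1, by rw [h2, hdp]⟩
      right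
      refine ⟨ds, prev, ?_, ?_, ?_, ?_, ?_⟩
      · simp [stepB, hcond, hdp]
      · simp only [stepB, if_pos hcond]
        rw [h1, List.map_append]
        simp only [List.map_cons, List.map_nil]
        rw [List.dropLast_concat, List.getLastD_concat]
        have hds : ds.map (fun v => v * p.count v) = ds.map (fun v => v * (p ++ [d]).count v) := by
          apply List.map_congr_left
          intro v hv
          have hvd : v ≠ d := by
            intro hh
            have hns := (List.nodup_append.mp hnd).2.2
            exact hns v hv prev (by simp) (by rw [hh, hdp])
          have : (p ++ [d]).count v = p.count v := by
            rw [List.count_append]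
            simp [Ne.symm hvd]
          rw [this]
        rw [List.map_append, ← hds]
        simp only [List.map_cons, List.map_nil]
        congr 1
        have hcp : (p ++ [d]).count prev = p.count prev + 1 := by
          rw [List.count_append]
          simp [hdp]
        rw [hcp, hdp]
        simp only [List.cons.injEq, and_true]
        push_cast
        ring
      · exact hnd
      · intro v
        rw [hiff v]
        simp only [List.mem_append, List.mem_singleton]
        constructor
        · tauto
        · rintro (h | h)
          · tauto
          · rw [h, hdp]
            exact (hiff prev).mp (by simp)
      · intro v hv
        rcases List.mem_append.mp hv with h | h
        · exact hbd v h
        · simp only [List.mem_singleton] at h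
          subst h; omega
    · -- new, strictly larger value starts a fresh run
      have hprevp : prev ∈ p := (hiff prev).mp (by simp)
      have hlt : prev < d := lt_of_le_of_ne (hd prev hprevp) (fun hh => hdp hh.symm)
      have hcond : ¬ (st.1 ≠ [] ∧ st.2 = some d) := by
        rintro ⟨-, hh⟩
        rw [h2] at hh
        exact hdp (Option.some.inj hh).symm
      have hnotp : d ∉ p := fun hh => absurd (hbd d hh) (by omega)
      right
      refine ⟨ds ++ [prev], d, ?_, ?_, ?_, ?_, ?_⟩
      · simp [stepB, hcond]
      · simp only [stepB, if_neg hcond]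
        rw [h1]
        have hcnt : ∀ v ∈ ds ++ [prev], (p ++ [d]).count v = p.count v := by
          intro v hv
          have hvp : v ∈ p := (hiff v).mp hv
          have hvd : v ≠ d := fun hh => absurd (hbd v hvp) (by omega)
          rw [List.count_append]
          simp [Ne.symm hvd]
        have hmap : (ds ++ [prev] ++ [d]).map (fun v => v * ((p ++ [d]).count v : Int))
            = (ds ++ [prev]).map (fun v => v * (p.count v : Int)) ++ [d] := by
          rw [List.map_append]
          congr 1
          · exact List.map_congr_left (fun v hv => by rw [hcnt v hv])
          · simp only [List.map_cons, List.map_nil]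
            rw [List.count_append, List.count_eq_zero_of_not_mem hnotp]
            simp
        rw [hmap]
      · rw [List.nodup_append]
        refine ⟨hnd, by simp, ?_⟩
        intro x hx y hy
        simp only [List.mem_singleton] at hy
        subst hy
        intro hxy; subst hxy
        exact hnotp ((hiff x).mp hx)
      · intro v
        simp only [List.mem_append, List.mem_singleton]
        have := hiff v
        simp only [List.mem_append, List.mem_singleton] at this
        tauto
      · intro v hv
        rcases List.mem_append.mp hv with h | h
        · have := hbd v h; omega
        · simp only [List.mem_singleton] at h; omega

lemma foldB_inv : ∀ (s p : List Int) (st : List Int × Option Int), InvB p st →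
    List.Pairwise (· ≤ ·) s → (∀ a ∈ s, ∀ v ∈ p, v ≤ a) →
    InvB (p ++ s) (s.foldl stepB st) := by
  intro s
  induction s with
  | nil => intro p st h _ _; simpa
  | cons a s ih =>
    intro p st h hpw hub
    have h1 : InvB (p ++ [a]) (stepB st a) := stepB_inv h a (hub a (by simp))
    have := ih (p ++ [a]) (stepB st a) h1 (List.pairwise_cons.mp hpw).2 ?_
    · simpa using this
    · intro b hb v hv
      rcases List.mem_append.mp hv with h' | h'
      · exact hub b (by simp [hb]) v h'
      · simp at h'; subst h'
        exact (List.pairwise_cons.mp hpw).1 b hb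

lemma goodB (xs : List Int) (hne : xs ≠ []) : Good xs (high_y_alt xs) := by
  set s := PySem.List.sorted xs (fun x => x) false with hs
  have hperm : s.Perm xs := PySem.List.sorted_perm xs (fun x => x) false
  have hsne : s ≠ [] := by
    intro h; exact hne (List.eq_nil_of_length_eq_zero (by
      have := hperm.length_eq; rw [h] at this; simpa using this.symm))
  have hpw : List.Pairwise (· ≤ ·) s := PySem.List.sorted_pairwise xs (fun x => x)
  have hinv : InvB s (s.foldl stepB ([], none)) := by
    have := foldB_inv s [] ([], none) (Or.inl ⟨rfl, rfl⟩) hpw (by simp)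
    simpa using this
  rcases hinv with ⟨hp, -⟩ | ⟨ds, prev, h2, h1, hnd, hiff, hbd⟩
  · exact absurd hp hsne
  · have hcnt : ∀ v, s.count v = xs.count v := fun v => hperm.count_eq v
    have hmem : ∀ v, v ∈ s ↔ v ∈ xs := fun v => hperm.mem_iff
    have hvne : (s.foldl stepB ([], none)).1 ≠ [] := by rw [h1]; simp
    obtain ⟨m, hm⟩ : ∃ m, PySem.List.max? (s.foldl stepB ([], none)).1 (fun y => y) = some m := by
      cases h : PySem.List.max? (s.foldl stepB ([], none)).1 (fun y => y) with
      | none => exact absurd ((PySem.List.max?_eq_none_iff _ _).mp h) hvne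
      | some m => exact ⟨m, rfl⟩
    have hres : high_y_alt xs = m := by simp [high_y_alt, ← hs, hm]
    rw [hres]
    constructor
    · have hmm := PySem.List.max?_mem hm
      rw [h1] at hmm
      obtain ⟨k, hk, hkm⟩ := List.mem_map.mp hmm
      exact ⟨k, (hmem k).mp ((hiff k).mp hk), by rw [← hkm, hcnt k]⟩
    · intro v hv
      have hvmem : v * s.count v ∈ (s.foldl stepB ([], none)).1 := by
        rw [h1]; exact List.mem_map.mpr ⟨v, (hiff v).mpr ((hmem v).mpr hv), rfl⟩
      have := PySem.List.max?_isMax hm _ hvmem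
      rw [hcnt v] at this
      exact this

-- ===== VERDICT (by name: the statement is the Claim_ definition above) =====
theorem high_y_spec : Claim_equal_high_y := by
  intro roll _ hpre
  exact good_unique (goodA roll hpre) (goodB roll hpre)
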